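-- pv_equiv track=rewrite | github.com/kgirtz/AdventOfCode | AoC2024/Day 22/Day 22.py | bananas_gotten
-- ===== SOURCE A (Python) =====
-- import collections
-- import itertools
-- from typing import Sequence, Iterable
--
-- def bananas_gotten(target_changes: Sequence[int], prices: list[int]) -> int:
-- #def bananas_gotten(target_changes: Sequence[int], secret_number: int, max_iterations: int) -> int:
--     target_changes = collections.deque(target_changes)
--     change_history: collections.deque[int] = collections.deque()
--     """prev_price: int = price(secret_number)
--     for _ in range(max_iterations):
--         secret_number = next_secret_number(secret_number)
--         cur_price: int = price(secret_number)"""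
--     #prev_price: int = prices[0]
--     #for cur_price in prices[1:]:
--     for prev_price, cur_price in itertools.pairwise(prices):
--         change_history.append(cur_price - prev_price)
--         if len(change_history) > 4:
--             change_history.popleft()
--         if change_history == target_changes:
--             return cur_price
--
--         #prev_price = cur_price
--
--     return 0
-- ===== SOURCE B (Python) =====
-- def bananas_gotten(target_changes, prices):
--     changes = [b - a for a, b in zip(prices, prices[1:])]
--     index = {}
--     for i, cur in enumerate(prices[1:]):
--         index.setdefault(tuple(changes[max(0, i - 3):i + 1]), cur)
--     return index.get(tuple(target_changes), 0)
-- ===== Notes on version B (the rewrite author's own statement) =====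
-- stated objective: alternative
-- what changed: Instead of comparing the sliding deque against the target at every step, B builds in one pass a dict indexing each change-window (length 1..4) to the first price seen after it, then answers with a single dict lookup of the target.
import Mathlib
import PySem

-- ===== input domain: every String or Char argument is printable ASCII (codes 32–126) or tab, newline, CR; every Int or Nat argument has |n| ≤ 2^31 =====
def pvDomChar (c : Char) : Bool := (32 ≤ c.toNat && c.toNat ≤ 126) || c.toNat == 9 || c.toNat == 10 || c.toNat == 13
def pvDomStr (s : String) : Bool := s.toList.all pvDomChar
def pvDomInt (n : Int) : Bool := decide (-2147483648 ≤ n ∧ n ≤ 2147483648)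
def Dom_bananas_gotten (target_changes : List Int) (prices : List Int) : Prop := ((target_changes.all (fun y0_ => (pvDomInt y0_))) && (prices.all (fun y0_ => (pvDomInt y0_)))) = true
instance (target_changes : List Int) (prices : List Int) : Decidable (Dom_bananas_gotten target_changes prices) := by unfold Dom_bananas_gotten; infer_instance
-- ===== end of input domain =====

-- B replaces A's scan-and-compare sliding deque with a one-pass window→first-price
-- index (dict via setdefault) followed by a single lookup; objective: alternative.

-- ===== PORT A =====
-- the for-loop over itertools.pairwise(prices) with the deque change_history
def bananas_gotten_go (target : List Int) (hist : List Int) (prev : Int) (rest : List Int) : Int :=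
  match rest with
  | [] => 0
  | cur :: rest' =>
    let h1 := hist ++ [cur - prev]                      -- change_history.append(...)
    let h2 := if 4 < h1.length then h1.tail else h1      -- popleft when len > 4
    if h2 == target then cur else bananas_gotten_go target h2 cur rest'

def bananas_gotten (target_changes : List Int) (prices : List Int) : Int :=
  match prices with
  | [] => 0                                              -- pairwise([]) is empty
  | p :: rest => bananas_gotten_go target_changes [] p rest

-- ===== PORT B =====
def bananas_gotten_alt (target_changes : List Int) (prices : List Int) : Int :=
  let tail := PySem.List.slice prices (some 1) none                       -- prices[1:]
  let changes := (prices.zip tail).map (fun ab => ab.2 - ab.1)            -- [b - a for a, b in zip(prices, prices[1:])]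
  let index := (PySem.List.enumerate tail).foldl
      (fun d ic =>
        d.setdefault (PySem.List.slice changes (some (max 0 (ic.1 - 3))) (some (ic.1 + 1))) ic.2)
      PySem.Dict.empty
  (index.get? target_changes).getD 0                                      -- index.get(tuple(target_changes), 0)

-- ===== PRECONDITION & SPEC =====
def Spec_bananas_gotten (target_changes : List Int) (prices : List Int) (out : Int) : Prop := out = bananas_gotten_alt target_changes prices
instance (target_changes : List Int) (prices : List Int) (out : Int) : Decidable (Spec_bananas_gotten target_changes prices out) := by unfold Spec_bananas_gotten; infer_instance

-- ===== CLAIM (what is proved, stated in full; the proofs are below) =====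
def Claim_equal_bananas_gotten : Prop := ∀ (target_changes : List Int) (prices : List Int), Dom_bananas_gotten target_changes prices → Spec_bananas_gotten target_changes prices (bananas_gotten target_changes prices)

-- ===== LEMMAS AND PROOFS =====

-- last min(4, |xs|) elements of xs (the content of A's capped deque)
def lastN4 (xs : List Int) : List Int := xs.drop (xs.length - 4)

-- A's per-step deque update
def stepH (h : List Int) (c : Int) : List Int :=
  let h1 := h ++ [c]
  if 4 < h1.length then h1.tail else h1

lemma stepH_lastN4 (acc : List Int) (c : Int) :
    stepH (lastN4 acc) c = lastN4 (acc ++ [c]) := by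
  unfold stepH lastN4
  by_cases h : 4 ≤ acc.length
  · have hne : acc.drop (acc.length - 4) ≠ [] := by
      simp [List.drop_eq_nil_iff]; omega
    rw [if_pos (by simp; omega), List.tail_append_of_ne_nil hne, List.tail_drop]
    rw [List.drop_append_of_le_length (by simp only [List.length_append, List.length_cons, List.length_nil]; omega),
        (show (acc ++ [c]).length - 4 = acc.length - 4 + 1 by simp only [List.length_append, List.length_cons, List.length_nil]; omega)]
  · rw [if_neg (by simp; omega)]
    rw [Nat.sub_eq_zero_of_le (by omega : acc.length ≤ 4), List.drop_zero]
    rw [Nat.sub_eq_zero_of_le (by simp; omega : (acc ++ [c]).length ≤ 4), List.drop_zero]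

-- the (window, price) trace of A's loop
def wins (hist : List Int) (prev : Int) (rest : List Int) : List (List Int × Int) :=
  match rest with
  | [] => []
  | cur :: r =>
    let h := stepH hist (cur - prev)
    (h, cur) :: wins h cur r

def refFind (target : List Int) (l : List (List Int × Int)) : Int :=
  ((l.find? (fun p => p.1 == target)).map (·.2)).getD 0

lemma goA_eq_refFind (target : List Int) :
    ∀ (rest : List Int) (hist : List Int) (prev : Int),
      bananas_gotten_go target hist prev rest = refFind target (wins hist prev rest) := by
  intro rest
  induction rest with
  | nil => intro hist prev; simp [bananas_gotten_go, wins, refFind]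
  | cons cur r ih =>
    intro hist prev
    have hA : bananas_gotten_go target hist prev (cur :: r)
        = (if stepH hist (cur - prev) == target then cur
           else bananas_gotten_go target (stepH hist (cur - prev)) cur r) := rfl
    rw [hA]
    show _ = refFind target ((stepH hist (cur - prev), cur) :: wins (stepH hist (cur - prev)) cur r)
    by_cases h : (stepH hist (cur - prev) == target) = true
    · simp [refFind, List.find?, h]
    · simp only [refFind, List.find?, h, Bool.false_eq_true, if_false]
      exact ih (stepH hist (cur - prev)) cur

-- the changes A computes step by step
def diffList (prev : Int) (rest : List Int) : List Int :=
  match rest with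
  | [] => []
  | cur :: r => (cur - prev) :: diffList cur r

lemma diffList_eq_zip (prev : Int) (rest : List Int) :
    diffList prev rest = ((prev :: rest).zip rest).map (fun ab => ab.2 - ab.1) := by
  induction rest generalizing prev with
  | nil => rfl
  | cons cur r ih => simp [diffList, List.zip, ih cur]

-- the trace of A's loop as an indexed map: window i = last ≤4 of the change prefix
lemma wins_map :
    ∀ (rest : List Int) (prev : Int) (acc : List Int),
      wins (lastN4 acc) prev rest
        = (PySem.List.enumerate rest (acc.length : Int)).map
            (fun ic => (lastN4 ((acc ++ diffList prev rest).take (ic.1.toNat + 1)), ic.2)) := by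
  intro rest
  induction rest with
  | nil => intro prev acc; simp [wins, PySem.List.enumerate]
  | cons cur r ih =>
    intro prev acc
    rw [PySem.List.enumerate_cons]
    simp only [wins, List.map_cons, stepH_lastN4]
    have htake : List.take (((acc.length : Int)).toNat + 1) (acc ++ diffList prev (cur :: r))
        = acc ++ [cur - prev] := by
      simp only [Int.toNat_natCast, diffList, List.take_append,
        List.take_of_length_le (Nat.le_succ _), Nat.add_sub_cancel_left, List.take_succ_cons,
        List.take_zero]
    have hcast : ((acc.length : Int) + 1) = (((acc ++ [cur - prev]).length : Nat) : Int) := by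
      simp
    rw [htake, hcast,
        show acc ++ diffList prev (cur :: r) = (acc ++ [cur - prev]) ++ diffList cur r by
          simp [diffList],
        ih cur (acc ++ [cur - prev])]

-- dict built by setdefault over a pair list: lookup = first occurrence
lemma dictfold_get? (t : List Int) :
    ∀ (l : List (List Int × Int)) (d : PySem.Dict (List Int) Int),
      ((l.foldl (fun d p => d.setdefault p.1 p.2) d).get? t)
        = (d.get? t).or ((l.find? (fun p => p.1 == t)).map (·.2)) := by
  intro l
  induction l with
  | nil => intro d; simp
  | cons kv l ih =>
    intro d
    simp only [List.foldl_cons, List.find?]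
    by_cases hk : (kv.1 == t) = true
    · have hkt : kv.1 = t := eq_of_beq hk
      subst hkt
      rw [ih, PySem.Dict.get?_setdefault_self]
      simp only [hk]
      cases d.get? kv.1 <;> simp
    · have hne : t ≠ kv.1 := fun h => hk (by simp [h])
      rw [ih, PySem.Dict.get?_setdefault_of_ne d kv.2 hne]
      simp only [hk]

-- the slice key B computes is the last-≤4 window of the change prefix
lemma slice_key (changes : List Int) (i : Nat) (hi : i < changes.length) :
    PySem.List.slice changes (some (max 0 ((i : Int) - 3))) (some ((i : Int) + 1))
      = lastN4 (changes.take (i + 1)) := by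
  have h1 : (max 0 ((i : Int) - 3)) = ((i - 3 : Nat) : Int) := by omega
  have h2 : ((i : Int) + 1) = ((i + 1 : Nat) : Int) := by omega
  rw [h1, h2, PySem.List.slice_natCast]
  unfold lastN4
  have hm : (changes.take (i + 1)).length - 4 = i - 3 := by
    rw [List.length_take]; omega
  rw [hm, List.drop_take]

theorem bananas_spec_main (target_changes : List Int) (prices : List Int) :
    bananas_gotten target_changes prices = bananas_gotten_alt target_changes prices := by
  cases prices with
  | nil => simp [bananas_gotten, bananas_gotten_alt, PySem.List.slice]
  | cons p tail =>
    simp only [bananas_gotten, bananas_gotten_alt]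
    rw [goA_eq_refFind]
    rw [PySem.List.slice_from_one]
    simp only [List.tail_cons]
    set changes := ((p :: tail).zip tail).map (fun ab => ab.2 - ab.1) with hch
    rw [show ((PySem.List.enumerate tail).foldl
        (fun d ic => d.setdefault (PySem.List.slice changes (some (max 0 (ic.1 - 3))) (some (ic.1 + 1))) ic.2)
        PySem.Dict.empty)
        = (((PySem.List.enumerate tail).map
            (fun ic => (PySem.List.slice changes (some (max 0 (ic.1 - 3))) (some (ic.1 + 1)), ic.2))).foldl
            (fun d q => d.setdefault q.1 q.2) PySem.Dict.empty)
      by rw [List.foldl_map]]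
    rw [dictfold_get?]
    have hlen : changes.length = tail.length := by simp [hch]
    have hwin : wins [] p tail
        = (PySem.List.enumerate tail).map
            (fun ic => (PySem.List.slice changes (some (max 0 (ic.1 - 3))) (some (ic.1 + 1)), ic.2)) := by
      have h0 : wins [] p tail = wins (lastN4 []) p tail := rfl
      rw [h0, wins_map tail p []]
      simp only [List.length_nil, Int.natCast_zero, List.nil_append]
      apply List.map_congr_left
      intro ic hic
      rw [PySem.List.mem_enumerate_iff] at hic
      obtain ⟨k, hk, hik⟩ := hic
      subst hik
      simp only [Int.zero_add, Int.toNat_natCast]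
      rw [slice_key changes k (by omega)]
      rw [diffList_eq_zip, ← hch]
    rw [← hwin]
    simp [refFind, PySem.Dict.get?_empty]

-- ===== VERDICT (by name: the statement is the Claim_ definition above) =====
theorem bananas_gotten_spec : Claim_equal_bananas_gotten := by
  intro target_changes prices _
  unfold Spec_bananas_gotten
  exact bananas_spec_main target_changes prices
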